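-- pv_equiv track=rewrite | github.com/nemakgregor/SCUCa | src/ml_models/warm_start.py | _startup_shutdown_from_commit
-- ===== SOURCE A (Python) =====
-- from typing import Dict, List, Optional, Tuple, Set
--
-- def _startup_shutdown_from_commit(
--     commit: List[int], initial_u: int
-- ) -> Tuple[List[int], List[int]]:
--     T = len(commit)
--     v = [0] * T
--     w = [0] * T
--     u_prev = initial_u
--     for t in range(T):
--         u_t = int(round(commit[t]))
--         delta = u_t - u_prev
--         if delta > 0:
--             v[t] = 1
--         elif delta < 0:
--             w[t] = 1
--         u_prev = u_t
--     return v, w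
-- ===== SOURCE B (Python) =====
-- from typing import List, Tuple
--
-- def _startup_shutdown_from_commit(
--     commit: List[int], initial_u: int
-- ) -> Tuple[List[int], List[int]]:
--     def solve(vals, u0):
--         n = len(vals)
--         if n == 0:
--             return [], []
--         if n == 1:
--             x = int(round(vals[0]))
--             return [int(x > u0)], [int(x < u0)]
--         mid = n // 2
--         left, right = vals[:mid], vals[mid:]
--         v1, w1 = solve(left, u0)
--         v2, w2 = solve(right, int(round(left[-1])))
--         return v1 + v2, w1 + w2
--     return solve(commit, initial_u)
-- ===== Notes on version B (the rewrite author's own statement) =====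
-- stated objective: alternative
-- what changed: Replaces the single fused left-to-right loop threading a u_prev accumulator into preallocated arrays with a divide-and-conquer recursion: split the commitment list in half, solve each half independently (the right half seeded with the left half's last rounded value), and concatenate the results.
import Mathlib
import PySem

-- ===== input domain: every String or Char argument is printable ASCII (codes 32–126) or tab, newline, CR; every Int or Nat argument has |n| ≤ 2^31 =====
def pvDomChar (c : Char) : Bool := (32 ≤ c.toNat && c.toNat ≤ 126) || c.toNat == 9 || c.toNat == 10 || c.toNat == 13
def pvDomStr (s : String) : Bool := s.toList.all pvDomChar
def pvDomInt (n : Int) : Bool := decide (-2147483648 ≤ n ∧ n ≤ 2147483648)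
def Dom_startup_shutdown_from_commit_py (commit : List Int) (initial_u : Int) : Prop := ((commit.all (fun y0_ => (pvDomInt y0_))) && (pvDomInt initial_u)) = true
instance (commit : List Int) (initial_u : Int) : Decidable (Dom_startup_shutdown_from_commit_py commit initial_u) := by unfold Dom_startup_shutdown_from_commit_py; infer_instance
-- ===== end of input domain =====

-- B replaces A's fused accumulator loop by a divide-and-conquer recursion on list halves
-- (alternative decomposition, same return value; neither version mutates its arguments).

-- ===== PORT A =====
-- A-side helper: the loop over t, threading u_prev and building v, w front-to-back.
def pvGoA : List Int → Int → List Int × List Int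
  | [], _ => ([], [])
  | c :: rest, u_prev =>
    let u_t := c          -- int(round(commit[t])) on an int is the int itself
    let delta := u_t - u_prev
    let (v, w) := pvGoA rest u_t
    ((if delta > 0 then 1 else 0) :: v, (if delta > 0 then 0 else if delta < 0 then 1 else 0) :: w)

def startup_shutdown_from_commit_py (commit : List Int) (initial_u : Int) : List Int × List Int :=
  pvGoA commit initial_u

-- ===== PORT B =====
-- B-side helper: divide and conquer on the list (Source B's inner `solve`).
def pvSolveB (vals : List Int) (u0 : Int) : List Int × List Int :=
  if vals.length = 0 then ([], [])
  else if vals.length = 1 then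
    -- x = int(round(vals[0])) is vals[0] itself on ints
    ([if vals.headI > u0 then 1 else 0], [if vals.headI < u0 then 1 else 0])
  else
    let mid := vals.length / 2
    let l := vals.take mid
    let r := vals.drop mid
    let p1 := pvSolveB l u0
    let p2 := pvSolveB r (l.getLastD 0)   -- left[-1]: l is nonempty since mid ≥ 1
    (p1.1 ++ p2.1, p1.2 ++ p2.2)
termination_by vals.length
decreasing_by
  · simp only [List.length_take]; omega
  · simp only [List.length_drop]; omega

def startup_shutdown_from_commit_py_alt (commit : List Int) (initial_u : Int) : List Int × List Int :=
  pvSolveB commit initial_u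

-- ===== PRECONDITION & SPEC =====
def Spec_startup_shutdown_from_commit_py (commit : List Int) (initial_u : Int) (out : List Int × List Int) : Prop := out = startup_shutdown_from_commit_py_alt commit initial_u
instance (commit : List Int) (initial_u : Int) (out : List Int × List Int) : Decidable (Spec_startup_shutdown_from_commit_py commit initial_u out) := by unfold Spec_startup_shutdown_from_commit_py; infer_instance

-- ===== CLAIM (what is proved, stated in full; the proofs are below) =====
def Claim_equal_startup_shutdown_from_commit_py : Prop := ∀ (commit : List Int) (initial_u : Int), Dom_startup_shutdown_from_commit_py commit initial_u → Spec_startup_shutdown_from_commit_py commit initial_u (startup_shutdown_from_commit_py commit initial_u)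

-- ===== LEMMAS AND PROOFS =====

-- A's loop splits over append: the right part is seeded with the left part's last value.
theorem pvGoA_append (xs ys : List Int) (u : Int) :
    pvGoA (xs ++ ys) u =
      ((pvGoA xs u).1 ++ (pvGoA ys (xs.getLastD u)).1,
       (pvGoA xs u).2 ++ (pvGoA ys (xs.getLastD u)).2) := by
  induction xs generalizing u with
  | nil => simp [pvGoA]
  | cons c rest ih =>
    simp only [List.cons_append, pvGoA, ih c]
    cases rest <;> simp [List.getLastD]

theorem getLastD_irrel (l : List Int) (a b : Int) (h : l ≠ []) :
    l.getLastD a = l.getLastD b := by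
  cases l with
  | nil => exact absurd rfl h
  | cons x xs => simp [List.getLastD]

theorem pvSolveB_eq_pvGoA : ∀ (vals : List Int) (u0 : Int),
    pvSolveB vals u0 = pvGoA vals u0 := by
  intro vals
  suffices h : ∀ (n : Nat) (vals : List Int), vals.length = n → ∀ u0, pvSolveB vals u0 = pvGoA vals u0 from
    fun u0 => h vals.length vals rfl u0
  intro n
  induction n using Nat.strong_induction_on with
  | _ n ih =>
    intro vals hlen u0
    subst hlen
    match hv : vals with
    | [] => simp [pvSolveB, pvGoA]
    | [x] =>
      rw [pvSolveB]
      simp only [List.length_cons, List.length_nil, pvGoA, List.headI]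
      norm_num
      split_ifs <;> first | rfl | omega
    | x :: y :: rest =>
      rw [pvSolveB]
      have hne0 : ¬ (x :: y :: rest).length = 0 := by simp
      have hne1 : ¬ (x :: y :: rest).length = 1 := by simp only [List.length_cons]; omega
      simp only [if_neg hne0, if_neg hne1]
      set vs := x :: y :: rest with hvs
      set mid := vs.length / 2 with hmid
      have hmid1 : 1 ≤ mid := by simp [hmid, hvs]; omega
      have hmidlt : mid < vs.length := by simp [hmid, hvs]; omega
      have htake : (vs.take mid).length = mid := by simp; omega
      have hdrop : (vs.drop mid).length = vs.length - mid := by simp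
      have h1 := ih (vs.take mid).length (by omega) (vs.take mid) rfl u0
      have h2 := ih (vs.drop mid).length (by omega) (vs.drop mid) rfl ((vs.take mid).getLastD 0)
      have htne : vs.take mid ≠ [] := by
        intro h; rw [h] at htake; simp at htake; omega
      have := pvGoA_append (vs.take mid) (vs.drop mid) u0
      rw [List.take_append_drop] at this
      rw [this, h1, h2, getLastD_irrel _ 0 u0 htne]

-- ===== VERDICT (by name: the statement is the Claim_ definition above) =====
theorem startup_shutdown_from_commit_py_spec : Claim_equal_startup_shutdown_from_commit_py := by
  intro commit initial_u _
  show startup_shutdown_from_commit_py commit initial_u = _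
  rw [startup_shutdown_from_commit_py, startup_shutdown_from_commit_py_alt, pvSolveB_eq_pvGoA]
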